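-- pv_equiv track=rewrite | github.com/miliar/Code_Jam_Webscraper | solutions_python/Problem_158/459.py | domino_tile
-- ===== SOURCE A (Python) =====
-- def domino_tile(X,R,C):
--
-- 	# see if the number of dominos just don't fit on the grid
-- 	if X > R and X > C:
-- 		return "RICHARD"
--
-- 	# see if there exists one that doesn't fit
-- 	all_hulls = [(k,X-k+1) for k in range(1,X+1)]
-- 	for hull in all_hulls:
-- 		if (hull[0] > R and hull[1] > R) or (hull[0] > C and hull[1] > C):
-- 			return "RICHARD"
--
--
-- 	# make sure it can be tiled at all
-- 	area = R*C
-- 	if area < X or area % X != 0: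
-- 		return "RICHARD"
--
-- 	# see if ricky can force any holes of size <= X
--
-- 	# case 1: choose a domino with a hole in it. if X >= 7 and R,C >= 3 this is possible
-- 	if X >= 7 and R >= 3 and C >= 3:
-- 		return "RICHARD"
--
-- 	# case 2: hole against the edge of the board somewhere?
-- 	allowable_hulls = [(k,X-k+1) for k in range(1,X+1) if (k <= R and X-k+1 <= C)]
-- 	if allowable_hulls:
-- 		hull_volume = max( allowable_hulls )
-- 	else:
-- 		hull_volume = 0
--
-- 	for hull in allowable_hulls:
-- 		if hull[0] == R:
-- 			# potentially blocking
-- 			# see if we can separate the volume into regions of bad areas for tiling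
-- 			deficit = hull[0] * hull[1] - X
-- 			# can separate the area into regions with n*R + d and n*R+(deficit-d) area,
-- 			# for some integer 0<=n<=C-hull[1] and 0<=d<=deficit
--
-- 			# slide the tile along and see what we can do
-- 			for d in range(deficit+1):
-- 				# need to find a d such that it's untileable for all n
-- 				untileable = True
-- 				for n in range(C - hull[1] + 1):
-- 					l_volume = n*hull[0] + d
-- 					r_volume = (C-n-hull[1])*hull[0] + (deficit - d)
-- 					if l_volume % X == 0 and r_volume % X == 0:
-- 						untileable = False
-- 				if untileable:
-- 					return "RICHARD"
-- 		if hull[1] == C: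
-- 			# potentially blocking
-- 			# see if we can separate the volume into regions of bad areas for tiling
-- 			deficit = hull[0] * hull[1] - X
-- 			# can separate the area into regions with n*R + d and n*R+(deficit-d) area,
-- 			# for some integer 0<=n<=C-hull[1] and 0<=d<=deficit
--
-- 			# slide the tile along and see what we can do
-- 			for d in range(deficit+1):
-- 				# need to find a d such that it's untileable for all n
-- 				untileable = True
-- 				for n in range(R - hull[0] + 1):
-- 					l_volume = n*hull[1] + d
-- 					r_volume = (R-n-hull[0])*hull[1] + (deficit - d)
-- 					if l_volume % X == 0 and r_volume % X == 0:
-- 						untileable = False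
-- 				if untileable:
-- 					return "RICHARD"
--
-- 	return "GABRIEL"
-- ===== SOURCE B (Python) =====
-- def domino_tile(X, R, C):
--     # For each omino size X (1..6) Gabriel wins exactly on boards whose long side
--     # is at least X, whose short side reaches a per-size minimum, and whose area
--     # is divisible by X -- except the single blockable board 3x5 for X == 5.
--     # Every omino of size >= 7 can be blocked.
--     if X >= 7:
--         return "RICHARD"
--     lo, hi = min(R, C), max(R, C)
--     min_short = (0, 1, 1, 2, 3, 3, 5)[X]
--     if hi < X or lo < min_short or (R * C) % X != 0 or (X == 5 and lo == 3 and hi == 5):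
--         return "RICHARD"
--     return "GABRIEL"
-- ===== Notes on version B (the rewrite author's own statement) =====
-- stated objective: alternative
-- what changed: Replaces the hull scan and the nested deficit/slide loops by a constant-time closed-form decision (minimum short side per omino size 1..6, long side >= X, area divisibility, and the single exceptional 3x5 board for X=5); Pre_ restricts to the problem's natural domain of positive omino sizes X >= 1, since for X = 0 A raises ZeroDivisionError on most boards and for X < 0 A's returned values are artifacts of its empty hull ranges.
-- outside the precondition, e.g. on domino_tile(-2, 2, 3): A returns 'GABRIEL', B returns 'RICHARD'; on domino_tile(0, 2, 3): A raises ZeroDivisionError, B raises ZeroDivisionError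
import Mathlib
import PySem

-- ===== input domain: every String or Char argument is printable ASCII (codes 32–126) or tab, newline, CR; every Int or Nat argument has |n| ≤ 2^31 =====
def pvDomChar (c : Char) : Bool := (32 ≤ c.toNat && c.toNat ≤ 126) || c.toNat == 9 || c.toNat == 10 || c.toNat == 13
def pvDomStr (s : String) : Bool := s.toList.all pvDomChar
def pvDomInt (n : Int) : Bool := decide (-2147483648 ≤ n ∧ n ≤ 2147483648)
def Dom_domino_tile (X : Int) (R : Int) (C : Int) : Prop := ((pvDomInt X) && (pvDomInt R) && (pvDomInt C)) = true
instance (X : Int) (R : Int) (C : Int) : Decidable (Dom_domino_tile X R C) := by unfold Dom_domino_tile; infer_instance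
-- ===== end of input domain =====

-- B replaces A's hull scan and nested slide loops by a constant-time closed-form decision (objective: alternative).

-- ===== PORT A =====
-- Python's two duplicated 'slide the tile' blocks are ported through one shared helper,
-- instantiated exactly as each block reads; '(C-n-hull[1])*hull[0]' appears as
-- '((C-hull[1])-n)*hull[0]' (same value, T := C-hull[1] passed in).  The dead variable
-- 'hull_volume' (computed, never used, of mixed int/tuple type) is omitted.
def untileable (X h T d Df : Int) : Bool :=
  (PySem.List.pyRange 0 (T + 1) 1).foldl
    (fun u n =>
      if (PySem.Int.mod (n * h + d) X == 0) && (PySem.Int.mod ((T - n) * h + (Df - d)) X == 0)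
      then false else u) true

def blockCheck (X h T Df : Int) : Bool :=
  (PySem.List.pyRange 0 (Df + 1) 1).any (fun d => untileable X h T d Df)

def domino_tile (X : Int) (R : Int) (C : Int) : String :=
  if X > R ∧ X > C then "RICHARD"
  else if ((PySem.List.pyRange 1 (X + 1) 1).map (fun k => (k, X - k + 1))).any (fun h =>
      (decide (h.1 > R) && decide (h.2 > R)) || (decide (h.1 > C) && decide (h.2 > C))) then "RICHARD"
  else if R * C < X ∨ ¬ PySem.Int.mod (R * C) X = 0 then "RICHARD"
  else if X ≥ 7 ∧ R ≥ 3 ∧ C ≥ 3 then "RICHARD"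
  else if (((PySem.List.pyRange 1 (X + 1) 1).filter
        (fun k => decide (k ≤ R) && decide (X - k + 1 ≤ C))).map (fun k => (k, X - k + 1))).any
      (fun h => (decide (h.1 = R) && blockCheck X h.1 (C - h.2) (h.1 * h.2 - X)) ||
                (decide (h.2 = C) && blockCheck X h.2 (R - h.1) (h.1 * h.2 - X))) then "RICHARD"
  else "GABRIEL"

-- ===== PORT B =====
-- the tuple index '(0,1,1,2,3,3,5)[X]' is ported with pyGetD (exact for in-range indexes;
-- Pre_ gives 1 ≤ X ≤ 6 at this point, so the default is never taken inside Pre_)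
def domino_tile_alt (X : Int) (R : Int) (C : Int) : String :=
  if X ≥ 7 then "RICHARD"
  else
    let lo := min R C
    let hi := max R C
    let min_short := PySem.List.pyGetD ([0, 1, 1, 2, 3, 3, 5] : List Int) X 0
    if hi < X ∨ lo < min_short ∨ ¬ PySem.Int.mod (R * C) X = 0 ∨ (X = 5 ∧ lo = 3 ∧ hi = 5)
    then "RICHARD" else "GABRIEL"

-- ===== PRECONDITION & SPEC =====
-- Pre_ restricts to the problem's natural domain of positive omino sizes X ≥ 1: for X = 0
-- A raises ZeroDivisionError on most boards, and for X < 0 A's returned values are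
-- artifacts of its empty hull ranges.
def Pre_domino_tile (X : Int) (R : Int) (C : Int) : Prop := 1 ≤ X
instance (X : Int) (R : Int) (C : Int) : Decidable (Pre_domino_tile X R C) := by
  unfold Pre_domino_tile; infer_instance

def pvWitness_domino_tile : Int × Int × Int := (2, 3, 4)

def Spec_domino_tile (X : Int) (R : Int) (C : Int) (out : String) : Prop := out = domino_tile_alt X R C
instance (X : Int) (R : Int) (C : Int) (out : String) : Decidable (Spec_domino_tile X R C out) := by unfold Spec_domino_tile; infer_instance

-- ===== CLAIM (what is proved, stated in full; the proofs are below) =====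
def Claim_equal_domino_tile : Prop := ∀ (X : Int) (R : Int) (C : Int), Dom_domino_tile X R C → Pre_domino_tile X R C → Spec_domino_tile X R C (domino_tile X R C)

-- ===== LEMMAS AND PROOFS =====

-- the flag-style inner loop ends false iff some iteration fired
lemma foldl_flag (l : List Int) (p : Int → Bool) :
    ∀ acc, l.foldl (fun u n => if p n then false else u) acc = (acc && !(l.any p)) := by
  induction l with
  | nil => intro acc; simp
  | cons a l ih =>
      intro acc
      simp only [List.foldl_cons, List.any_cons, ih]
      by_cases h : p a = true <;> simp [h]

lemma dvd_shift (X a c : Int) : X ∣ a + c * X ↔ X ∣ a := by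
  constructor
  · intro hh; have := hh.sub (dvd_mul_left X c); simpa using this
  · intro hh; exact hh.add (dvd_mul_left X c)

lemma any_congr {α : Type} (l : List α) (f g : α → Bool) (h : ∀ x ∈ l, f x = g x) :
    l.any f = l.any g := by
  induction l with
  | nil => rfl
  | cons a l ih =>
      simp only [List.any_cons, h a (List.mem_cons_self),
        ih fun x hx => h x (List.mem_cons_of_mem a hx)]

lemma mod_sub_mul (a c X : Int) (hX : 0 < X) :
    PySem.Int.mod (a - c * X) X = PySem.Int.mod a X := by
  rw [PySem.Int.mod_eq_emod_of_pos hX, PySem.Int.mod_eq_emod_of_pos hX,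
    show a - c * X = a + X * (-c) by ring, Int.add_mul_emod_self_left]

-- the n-slide loop is invariant under shrinking its span by one period X
lemma untileable_congr (X h T d Df : Int) (hX : 0 < X) (hT : 2 * X ≤ T + 1) :
    untileable X h T d Df = untileable X h (T - X) d Df := by
  unfold untileable
  rw [foldl_flag, foldl_flag]
  simp only [Bool.true_and]
  have main : ((PySem.List.pyRange 0 (T + 1) 1).any fun n =>
        (PySem.Int.mod (n * h + d) X == 0) && (PySem.Int.mod ((T - n) * h + (Df - d)) X == 0)) =
      ((PySem.List.pyRange 0 (T - X + 1) 1).any fun n =>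
        (PySem.Int.mod (n * h + d) X == 0) && (PySem.Int.mod ((T - X - n) * h + (Df - d)) X == 0)) := by
    rw [Bool.eq_iff_iff]
    simp only [List.any_eq_true, PySem.List.mem_pyRange_one, Bool.and_eq_true, beq_iff_eq,
      PySem.Int.mod_eq_zero_iff_dvd]
    constructor
    · rintro ⟨n, ⟨h0, hlt⟩, ha, hb⟩
      by_cases hc : X ≤ n
      · refine ⟨n - X, ⟨by omega, by omega⟩, ?_, ?_⟩
        · rw [show (n - X) * h + d = (n * h + d) + (-h) * X by ring]
          exact (dvd_shift _ _ _).mpr ha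
        · rw [show (T - X - (n - X)) * h + (Df - d) = (T - n) * h + (Df - d) by ring]
          exact hb
      · refine ⟨n, ⟨h0, by omega⟩, ha, ?_⟩
        rw [show (T - X - n) * h + (Df - d) = ((T - n) * h + (Df - d)) + (-h) * X by ring]
        exact (dvd_shift _ _ _).mpr hb
    · rintro ⟨n, ⟨h0, hlt⟩, ha, hb⟩
      refine ⟨n + X, ⟨by omega, by omega⟩, ?_, ?_⟩
      · rw [show (n + X) * h + d = (n * h + d) + h * X by ring]
        exact (dvd_shift _ _ _).mpr ha
      · rw [show (T - (n + X)) * h + (Df - d) = (T - X - n) * h + (Df - d) by ring]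
        exact hb
  rw [main]

lemma blockCheck_congr (X h T Df : Int) (hX : 0 < X) (hT : 2 * X ≤ T + 1) :
    blockCheck X h T Df = blockCheck X h (T - X) Df := by
  unfold blockCheck
  exact any_congr _ _ _ fun d _ => untileable_congr X h T d Df hX hT

-- step lemma: for 1 ≤ X ≤ 6 and large C, A is invariant under C ↦ C - X
lemma stepC (X R C : Int) (h1 : 1 ≤ X) (h6 : X ≤ 6) (hC : 19 ≤ C) :
    domino_tile X R C = domino_tile X R (C - X) := by
  unfold domino_tile
  refine if_congr (by omega) rfl (if_congr ?_ rfl (if_congr ?_ rfl (if_congr (by omega) rfl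
    (if_congr ?_ rfl rfl))))
  · rw [any_congr _ _ (fun h =>
      (decide (h.1 > R) && decide (h.2 > R) || (decide (h.1 > (C - X)) && decide (h.2 > (C - X)))))]
    intro x hx
    rcases List.mem_map.mp hx with ⟨k, hk, rfl⟩
    rw [PySem.List.mem_pyRange_one] at hk
    rw [Bool.eq_iff_iff]
    simp only [Bool.or_eq_true, Bool.and_eq_true, decide_eq_true_eq]
    omega
  · rw [show R * (C - X) = R * C - R * X by ring, mod_sub_mul _ _ _ (by omega)]
    refine or_congr ?_ Iff.rfl
    constructor
    · intro hlt
      have hR : R ≤ 0 := by nlinarith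
      nlinarith [mul_nonneg (neg_nonneg.mpr hR) (show (0:Int) ≤ C - X by omega)]
    · intro hlt
      have hR : R ≤ 0 := by nlinarith
      nlinarith [mul_nonneg (neg_nonneg.mpr hR) (show (0:Int) ≤ C by omega)]
  · rw [List.filter_congr (q := fun k => decide (k ≤ R) && decide (X - k + 1 ≤ C - X)) (by
      intro k hk
      rw [PySem.List.mem_pyRange_one] at hk
      rw [Bool.eq_iff_iff]
      simp only [Bool.and_eq_true, decide_eq_true_eq]
      omega)]
    rw [any_congr _ _ (fun p =>
      (decide (p.1 = R) && blockCheck X p.1 ((C - X) - p.2) (p.1 * p.2 - X)) ||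
      (decide (p.2 = (C - X)) && blockCheck X p.2 (R - p.1) (p.1 * p.2 - X)))]
    intro x hx
    rcases List.mem_map.mp hx with ⟨k, hk', rfl⟩
    rcases List.mem_filter.mp hk' with ⟨hk, _⟩
    rw [PySem.List.mem_pyRange_one] at hk
    have hbc : blockCheck X k (C - (X - k + 1)) (k * (X - k + 1) - X)
        = blockCheck X k ((C - X) - (X - k + 1)) (k * (X - k + 1) - X) := by
      rw [show (C - X) - (X - k + 1) = (C - (X - k + 1)) - X by ring]
      exact blockCheck_congr _ _ _ _ (by omega) (by omega)
    rw [show ((k, X - k + 1) : Int × Int).1 = k from rfl,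
      show ((k, X - k + 1) : Int × Int).2 = X - k + 1 from rfl] at *
    rw [hbc, decide_eq_false (by omega : ¬ (X - k + 1 = C)),
      decide_eq_false (by omega : ¬ (X - k + 1 = C - X))]

-- step lemma: for 1 ≤ X ≤ 6 and large R, A is invariant under R ↦ R - X
lemma stepR (X R C : Int) (h1 : 1 ≤ X) (h6 : X ≤ 6) (hR : 19 ≤ R) :
    domino_tile X R C = domino_tile X (R - X) C := by
  unfold domino_tile
  refine if_congr (by omega) rfl (if_congr ?_ rfl (if_congr ?_ rfl (if_congr (by omega) rfl
    (if_congr ?_ rfl rfl))))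
  · rw [any_congr _ _ (fun h =>
      (decide (h.1 > (R - X)) && decide (h.2 > (R - X)) || (decide (h.1 > C) && decide (h.2 > C))))]
    intro x hx
    rcases List.mem_map.mp hx with ⟨k, hk, rfl⟩
    rw [PySem.List.mem_pyRange_one] at hk
    rw [Bool.eq_iff_iff]
    simp only [Bool.or_eq_true, Bool.and_eq_true, decide_eq_true_eq]
    omega
  · rw [show (R - X) * C = R * C - C * X by ring, mod_sub_mul _ _ _ (by omega)]
    refine or_congr ?_ Iff.rfl
    constructor
    · intro hlt
      have hC : C ≤ 0 := by nlinarith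
      nlinarith [mul_nonneg (neg_nonneg.mpr hC) (show (0:Int) ≤ R - X by omega)]
    · intro hlt
      have hC : C ≤ 0 := by nlinarith
      nlinarith [mul_nonneg (neg_nonneg.mpr hC) (show (0:Int) ≤ R by omega)]
  · rw [List.filter_congr (q := fun k => decide (k ≤ R - X) && decide (X - k + 1 ≤ C)) (by
      intro k hk
      rw [PySem.List.mem_pyRange_one] at hk
      rw [Bool.eq_iff_iff]
      simp only [Bool.and_eq_true, decide_eq_true_eq]
      omega)]
    rw [any_congr _ _ (fun p =>
      (decide (p.1 = (R - X)) && blockCheck X p.1 (C - p.2) (p.1 * p.2 - X)) ||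
      (decide (p.2 = C) && blockCheck X p.2 ((R - X) - p.1) (p.1 * p.2 - X)))]
    intro x hx
    rcases List.mem_map.mp hx with ⟨k, hk', rfl⟩
    rcases List.mem_filter.mp hk' with ⟨hk, _⟩
    rw [PySem.List.mem_pyRange_one] at hk
    have hbc : blockCheck X (X - k + 1) (R - k) (k * (X - k + 1) - X)
        = blockCheck X (X - k + 1) ((R - X) - k) (k * (X - k + 1) - X) := by
      rw [show (R - X) - k = (R - k) - X by ring]
      exact blockCheck_congr _ _ _ _ (by omega) (by omega)
    rw [show ((k, X - k + 1) : Int × Int).1 = k from rfl,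
      show ((k, X - k + 1) : Int × Int).2 = X - k + 1 from rfl] at *
    rw [hbc, decide_eq_false (by omega : ¬ (k = R)),
      decide_eq_false (by omega : ¬ (k = R - X))]

-- B for 1 ≤ X ≤ 6 in one if, with min/max spelled out
lemma altForm (X R C : Int) (h1 : 1 ≤ X) (h6 : X ≤ 6) :
    domino_tile_alt X R C =
      if (if R ≤ C then C else R) < X ∨
         (if R ≤ C then R else C) < PySem.List.pyGetD ([0, 1, 1, 2, 3, 3, 5] : List Int) X 0 ∨
         ¬ PySem.Int.mod (R * C) X = 0 ∨
         (X = 5 ∧ (if R ≤ C then R else C) = 3 ∧ (if R ≤ C then C else R) = 5)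
      then "RICHARD" else "GABRIEL" := by
  simp only [domino_tile_alt]
  rw [if_neg (by omega)]
  simp only [min_def, max_def]

lemma ms_bounds (X : Int) (h1 : 1 ≤ X) (h6 : X ≤ 6) :
    1 ≤ PySem.List.pyGetD ([0, 1, 1, 2, 3, 3, 5] : List Int) X 0 ∧
    PySem.List.pyGetD ([0, 1, 1, 2, 3, 3, 5] : List Int) X 0 ≤ 5 := by
  interval_cases X <;> exact ⟨by decide, by decide⟩

lemma stepAltC (X R C : Int) (h1 : 1 ≤ X) (h6 : X ≤ 6) (hC : 19 ≤ C) :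
    domino_tile_alt X R C = domino_tile_alt X R (C - X) := by
  rw [altForm _ _ _ h1 h6, altForm _ _ _ h1 h6]
  refine if_congr ?_ rfl rfl
  rw [show R * (C - X) = R * C - R * X by ring, mod_sub_mul _ _ _ (by omega)]
  set M := PySem.List.pyGetD ([0, 1, 1, 2, 3, 3, 5] : List Int) X 0 with hM
  obtain ⟨hms1, hms5⟩ := ms_bounds X h1 h6
  rw [← hM] at hms1 hms5
  by_cases hP : PySem.Int.mod (R * C) X = 0 <;> split_ifs <;> simp [hP] <;> omega

lemma stepAltR (X R C : Int) (h1 : 1 ≤ X) (h6 : X ≤ 6) (hR : 19 ≤ R) :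
    domino_tile_alt X R C = domino_tile_alt X (R - X) C := by
  rw [altForm _ _ _ h1 h6, altForm _ _ _ h1 h6]
  refine if_congr ?_ rfl rfl
  rw [show (R - X) * C = R * C - C * X by ring, mod_sub_mul _ _ _ (by omega)]
  set M := PySem.List.pyGetD ([0, 1, 1, 2, 3, 3, 5] : List Int) X 0 with hM
  obtain ⟨hms1, hms5⟩ := ms_bounds X h1 h6
  rw [← hM] at hms1 hms5
  by_cases hP : PySem.Int.mod (R * C) X = 0 <;> split_ifs <;> simp [hP] <;> omega

-- a nonpositive side loses immediately for 1 ≤ X ≤ 6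
lemma negsmall (X R C : Int) (h1 : 1 ≤ X) (h6 : X ≤ 6) (h : R ≤ 0 ∨ C ≤ 0) :
    domino_tile X R C = domino_tile_alt X R C := by
  have hA : domino_tile X R C = "RICHARD" := by
    unfold domino_tile
    by_cases hone : X > R ∧ X > C
    · rw [if_pos hone]
    · rw [if_neg hone, if_pos ?_]
      refine List.any_eq_true.mpr ⟨((1 : Int), X - 1 + 1),
        List.mem_map.mpr ⟨1, PySem.List.mem_pyRange_one.mpr ⟨by omega, by omega⟩, rfl⟩, ?_⟩
      simp only [Bool.or_eq_true, Bool.and_eq_true, decide_eq_true_eq]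
      omega
  have hB : domino_tile_alt X R C = "RICHARD" := by
    rw [altForm _ _ _ h1 h6]
    obtain ⟨hms1, _⟩ := ms_bounds X h1 h6
    rw [if_pos ?_]
    refine Or.inr (Or.inl ?_)
    split_ifs <;> omega
  rw [hA, hB]

-- all of X ∈ [1,6], R,C ∈ [1,18] checked by kernel evaluation
lemma fin_check :
    ((List.range 6).all fun x => (List.range 18).all fun r => (List.range 18).all fun c =>
      domino_tile ((x : Int) + 1) ((r : Int) + 1) ((c : Int) + 1) ==
      domino_tile_alt ((x : Int) + 1) ((r : Int) + 1) ((c : Int) + 1)) = true := by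
  decide

lemma small_case (X R C : Int) (h1 : 1 ≤ X) (h6 : X ≤ 6) (hR1 : 1 ≤ R) (hR : R ≤ 18)
    (hC1 : 1 ≤ C) (hC : C ≤ 18) : domino_tile X R C = domino_tile_alt X R C := by
  have h := fin_check
  simp only [List.all_eq_true, List.mem_range, beq_iff_eq] at h
  rw [show X = ((X - 1).toNat : Int) + 1 by omega, show R = ((R - 1).toNat : Int) + 1 by omega,
    show C = ((C - 1).toNat : Int) + 1 by omega]
  exact h _ (by omega) _ (by omega) _ (by omega)

lemma midX_pos (n : Nat) : ∀ X R C : Int, 1 ≤ X → X ≤ 6 → 1 ≤ R → 1 ≤ C →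
    R + C ≤ (n : Int) → domino_tile X R C = domino_tile_alt X R C := by
  induction n with
  | zero => intro X R C h1 h6 hR hC hn; exact absurd hn (by omega)
  | succ n ih =>
      intro X R C h1 h6 hR hC hn
      by_cases hCl : 19 ≤ C
      · rw [stepC X R C h1 h6 hCl, stepAltC X R C h1 h6 hCl]
        exact ih X R (C - X) h1 h6 hR (by omega) (by push_cast at hn ⊢; omega)
      by_cases hRl : 19 ≤ R
      · rw [stepR X R C h1 h6 hRl, stepAltR X R C h1 h6 hRl]
        exact ih X (R - X) C h1 h6 (by omega) hC (by push_cast at hn ⊢; omega)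
      · exact small_case X R C h1 h6 hR (by omega) hC (by omega)

lemma midX (X R C : Int) (h1 : 1 ≤ X) (h6 : X ≤ 6) :
    domino_tile X R C = domino_tile_alt X R C := by
  by_cases hneg : R ≤ 0 ∨ C ≤ 0
  · exact negsmall X R C h1 h6 hneg
  · exact midX_pos (R + C).toNat X R C h1 h6 (by omega) (by omega) (by omega)

-- X ≥ 7 always returns RICHARD in A
lemma bigX (X R C : Int) (h7 : 7 ≤ X) : domino_tile X R C = "RICHARD" := by
  unfold domino_tile
  by_cases hA : X > R ∧ X > C
  · rw [if_pos hA]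
  rw [if_neg hA]
  by_cases hB : (((PySem.List.pyRange 1 (X + 1) 1).map (fun k => (k, X - k + 1))).any (fun h =>
      (decide (h.1 > R) && decide (h.2 > R)) || (decide (h.1 > C) && decide (h.2 > C)))) = true
  · rw [if_pos hB]
  rw [if_neg hB]
  by_cases hCc : R * C < X ∨ ¬ PySem.Int.mod (R * C) X = 0
  · rw [if_pos hCc]
  rw [if_neg hCc, if_pos ?_]
  rw [List.any_eq_true] at hB
  push Not at hB
  have h4 := hB ((4 : Int), X - 4 + 1)
    (List.mem_map.mpr ⟨4, PySem.List.mem_pyRange_one.mpr ⟨by omega, by omega⟩, rfl⟩)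
  simp at h4
  exact ⟨by omega, by omega, by omega⟩

-- ===== VERDICT (by name: the statement is the Claim_ definition above) =====
theorem domino_tile_spec : Claim_equal_domino_tile := by
  intro X R C _ hpre
  unfold Pre_domino_tile at hpre
  unfold Spec_domino_tile
  by_cases h6 : X ≤ 6
  · exact midX X R C hpre h6
  · rw [bigX X R C (by omega)]
    simp only [domino_tile_alt]
    rw [if_pos (by omega)]
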